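-- pv_equiv track=rewrite | github.com/Prestonjf/sourcecode | com/prestonsproductions/sourcecode/ThemePark2019/ThemePark2019A.py | getMaxNumberOfRides
-- ===== SOURCE A (Python) =====
-- def getMaxNumberOfRides(attractions, funds):
--     cost = 0
--     count = 0
--     attractions.sort(key=getAttractionCost)
--     for a in attractions:
--         if (cost + a['COST'] > funds):
--             break
--         else:
--             cost += a['COST']
--             count += 1
--     return count
--
-- def getAttractionCost(a):
--     return a['COST']
-- ===== SOURCE B (Python) =====
-- def getMaxNumberOfRides(attractions, funds):
--     remaining = list(attractions)
--     count = 0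
--     while remaining:
--         cheapest = min(remaining, key=getAttractionCost)
--         c = cheapest['COST']
--         if c > funds:
--             break
--         funds -= c
--         count += 1
--         remaining.remove(cheapest)
--     return count
--
-- def getAttractionCost(a):
--     return a['COST']
-- ===== Notes on version B (the rewrite author's own statement) =====
-- stated objective: alternative
-- what changed: A sorts the whole list and scans a prefix with a running total; B never sorts: it repeatedly extracts the cheapest remaining attraction (min with key) and subtracts its cost from the remaining budget until the cheapest no longer fits, so the data structure is a shrinking pool instead of a sorted prefix.
import Mathlib
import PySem

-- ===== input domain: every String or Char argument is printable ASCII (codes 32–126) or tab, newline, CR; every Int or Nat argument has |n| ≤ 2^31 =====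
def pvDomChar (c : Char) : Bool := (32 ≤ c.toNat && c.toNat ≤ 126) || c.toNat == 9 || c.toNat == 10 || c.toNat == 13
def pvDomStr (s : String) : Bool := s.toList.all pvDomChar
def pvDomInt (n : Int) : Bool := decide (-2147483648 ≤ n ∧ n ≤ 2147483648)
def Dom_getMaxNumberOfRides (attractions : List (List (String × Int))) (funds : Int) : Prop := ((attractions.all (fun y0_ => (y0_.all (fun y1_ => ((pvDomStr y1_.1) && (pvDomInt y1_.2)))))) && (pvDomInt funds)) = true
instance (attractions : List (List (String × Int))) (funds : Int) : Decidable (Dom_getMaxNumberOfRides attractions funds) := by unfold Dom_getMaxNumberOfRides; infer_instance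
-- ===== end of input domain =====

-- B replaces A's sort-then-scan-prefix loop by repeated extract-min from a shrinking pool with a
-- remaining-budget accumulator (alternative algorithm, no sort). Return-value equivalence only:
-- A sorts the argument in place, B works on a copy and leaves the argument unmutated.

-- ===== PORT A =====
-- a['COST'] (first-match dict lookup; Pre_ guarantees the key is present, so the getD default is never used)
def getAttractionCost (a : List (String × Int)) : Int :=
  ((PySem.Dict.mk a).get? "COST").getD 0

-- the for-loop with break: state (cost, count)
def pvLoopA (funds : Int) : List (List (String × Int)) → Int → Int → Int
  | [], _cost, count => count
  | a :: rest, cost, count =>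
      if cost + getAttractionCost a > funds then count
      else pvLoopA funds rest (cost + getAttractionCost a) (count + 1)

def getMaxNumberOfRides (attractions : List (List (String × Int))) (funds : Int) : Int :=
  pvLoopA funds (PySem.List.sorted attractions getAttractionCost) 0 0

-- ===== PORT B =====
def getAttractionCost_alt (a : List (String × Int)) : Int :=
  ((PySem.Dict.mk a).get? "COST").getD 0

-- the while loop over the shrinking pool: min picks the first cheapest element, remove drops its
-- first occurrence, funds is the remaining budget ((…).getD [] is unreachable: min's result is in l)
def pvLoopB (funds : Int) (l : List (List (String × Int))) (count : Int) : Int :=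
  match hm : PySem.List.min? l getAttractionCost_alt with
  | none => count
  | some m =>
      if getAttractionCost_alt m > funds then count
      else pvLoopB (funds - getAttractionCost_alt m) ((PySem.List.remove? l m).getD []) (count + 1)
  termination_by l.length
  decreasing_by
    have hmem : m ∈ l := PySem.List.min?_mem hm
    rw [PySem.List.remove?_eq_some_erase l m hmem]
    have h1 := List.length_erase_of_mem hmem
    have h2 : 0 < l.length := List.length_pos_of_mem hmem
    simp only [Option.getD_some]
    omega

def getMaxNumberOfRides_alt (attractions : List (List (String × Int))) (funds : Int) : Int :=
  pvLoopB funds attractions 0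

-- ===== PRECONDITION & SPEC =====
-- Pre_ excludes exactly the inputs on which A raises KeyError: some attraction lacks the key "COST".
def Pre_getMaxNumberOfRides (attractions : List (List (String × Int))) (funds : Int) : Prop :=
  (attractions.all (fun a => a.any (fun p => p.1 == "COST"))) = true
instance (attractions : List (List (String × Int))) (funds : Int) : Decidable (Pre_getMaxNumberOfRides attractions funds) := by unfold Pre_getMaxNumberOfRides; infer_instance
def pvWitness_getMaxNumberOfRides : (List (List (String × Int))) × Int := ([[("COST", 3)], [("COST", 1)]], 4)

def Spec_getMaxNumberOfRides (attractions : List (List (String × Int))) (funds : Int) (out : Int) : Prop := out = getMaxNumberOfRides_alt attractions funds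
instance (attractions : List (List (String × Int))) (funds : Int) (out : Int) : Decidable (Spec_getMaxNumberOfRides attractions funds out) := by unfold Spec_getMaxNumberOfRides; infer_instance

-- ===== CLAIM (what is proved, stated in full; the proofs are below) =====
def Claim_equal_getMaxNumberOfRides : Prop := ∀ (attractions : List (List (String × Int))) (funds : Int), Dom_getMaxNumberOfRides attractions funds → Pre_getMaxNumberOfRides attractions funds → Spec_getMaxNumberOfRides attractions funds (getMaxNumberOfRides attractions funds)

-- ===== LEMMAS AND PROOFS =====

-- proof-only common abstraction: the loop on the bare cost sequence with a remaining-budget accumulator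
def pvLoopK (f : Int) : List Int → Int → Int
  | [], k => k
  | c :: cs, k => if c > f then k else pvLoopK (f - c) cs (k + 1)

-- A's loop, at running total `cost`, is pvLoopK on the costs with budget funds - cost
theorem pvLoopA_eq_loopK (funds : Int) (l : List (List (String × Int))) :
    ∀ (cost k : Int), pvLoopA funds l cost k = pvLoopK (funds - cost) (l.map getAttractionCost) k := by
  induction l with
  | nil => intro cost k; simp [pvLoopA, pvLoopK]
  | cons a rest ih =>
      intro cost k
      simp only [pvLoopA, List.map, pvLoopK]
      by_cases h : cost + getAttractionCost a > funds
      · rw [if_pos h, if_pos (by omega)]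
      · rw [if_neg h, if_neg (by omega), ih]
        have he : funds - (cost + getAttractionCost a) = funds - cost - getAttractionCost a := by ring
        rw [he]

-- B's extract-min loop is pvLoopK on the sorted cost sequence
theorem pvLoopB_eq_loopK : ∀ (n : Nat) (l : List (List (String × Int))), l.length ≤ n →
    ∀ (f k : Int), pvLoopB f l k =
      pvLoopK f ((PySem.List.sorted l getAttractionCost_alt).map getAttractionCost_alt) k := by
  intro n
  induction n with
  | zero =>
      intro l hl f k
      have hnil : l = [] := List.length_eq_zero_iff.mp (Nat.le_zero.mp hl)
      subst hnil
      rw [pvLoopB.eq_def]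
      simp [pvLoopK, PySem.List.min?, PySem.List.sorted]
  | succ n ih =>
      intro l hl f k
      match hm : PySem.List.min? l getAttractionCost_alt with
      | none =>
          have hnil : l = [] := (PySem.List.min?_eq_none_iff l getAttractionCost_alt).mp hm
          subst hnil
          rw [pvLoopB.eq_def]
          simp [pvLoopK, PySem.List.min?, PySem.List.sorted]
      | some m =>
          have hmem : m ∈ l := PySem.List.min?_mem hm
          have hne : PySem.List.sorted l getAttractionCost_alt ≠ [] := by
            rw [Ne, PySem.List.sorted_eq_nil_iff]
            exact List.ne_nil_of_mem hmem
          obtain ⟨m', t, hs⟩ := List.exists_cons_of_ne_nil hne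
          have hm'mem : m' ∈ l := by
            have : m' ∈ PySem.List.sorted l getAttractionCost_alt := by
              rw [hs]; exact List.mem_cons_self
            rwa [PySem.List.mem_sorted] at this
          -- the head of the sorted list and the min have the same key
          have hkey : getAttractionCost_alt m' = getAttractionCost_alt m := by
            have h1 := PySem.List.key_head_sorted_le l getAttractionCost_alt hs m hmem
            have h2 := PySem.List.min?_isMin hm m' hm'mem
            omega
          -- the tails carry the same cost sequence
          have htail : t.map getAttractionCost_alt =
              (PySem.List.sorted (l.erase m) getAttractionCost_alt).map getAttractionCost_alt := by
            apply List.Perm.eq_of_pairwise (le := (· ≤ · : Int → Int → Prop))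
              (fun a b _ _ hab hba => le_antisymm hab hba)
            · have hp := PySem.List.sorted_pairwise (xs := l) (key := getAttractionCost_alt)
              rw [hs] at hp
              exact List.pairwise_map.mpr hp.of_cons
            · exact PySem.List.sorted_map_key_pairwise (l.erase m) getAttractionCost_alt
            · have p1 : (m' :: t).Perm l := by
                rw [← hs]; exact PySem.List.sorted_perm ..
              have p2 : l.Perm (m :: l.erase m) := List.perm_cons_erase hmem
              have p3 : (PySem.List.sorted (l.erase m) getAttractionCost_alt).Perm (l.erase m) :=
                PySem.List.sorted_perm ..
              have pm : ((m' :: t).map getAttractionCost_alt).Perm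
                  ((m :: l.erase m).map getAttractionCost_alt) := (p1.trans p2).map _
              simp only [List.map_cons, hkey] at pm
              exact pm.cons_inv.trans ((p3.map _).symm)
          -- one step of B, then the inner induction hypothesis on the smaller pool
          rw [pvLoopB.eq_def]
          split
          · next heq => rw [hm] at heq; cases heq
          · next m2 heq =>
            rw [hm] at heq
            injection heq with hm2
            subst hm2
            rw [hs, List.map_cons]
            simp only [pvLoopK, hkey]
            by_cases h : getAttractionCost_alt m > f
            · rw [if_pos h, if_pos h]
            · rw [if_neg h, if_neg h]
              rw [PySem.List.remove?_eq_some_erase l m hmem, Option.getD_some]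
              have hlen : (l.erase m).length ≤ n := by
                have h1 := List.length_erase_of_mem hmem
                have h2 : 0 < l.length := List.length_pos_of_mem hmem
                omega
              rw [ih (l.erase m) hlen, htail]

-- ===== VERDICT (by name: the statement is the Claim_ definition above) =====
theorem getMaxNumberOfRides_spec : Claim_equal_getMaxNumberOfRides := by
  intro attractions funds _ _
  unfold Spec_getMaxNumberOfRides getMaxNumberOfRides getMaxNumberOfRides_alt
  have hk : getAttractionCost = getAttractionCost_alt := rfl
  rw [pvLoopA_eq_loopK, pvLoopB_eq_loopK attractions.length attractions le_rfl, hk]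
  simp
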